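-- pv_equiv track=rewrite | github.com/gcharris/writers-factory-app | backend/services/context_assembler.py | _format_relationships
-- ===== SOURCE A (Python) =====
-- from typing import Dict, List, Optional, TYPE_CHECKING
--
-- def _format_relationships(entities: List[str], edges: List[Dict]) -> str:
--     """Format relevant relationships between entities."""
--     parts = ["## Relationships"]
--     entity_set = {e.lower() for e in entities}
--     relevant_edges = []
--
--     for edge in edges:
--         source = edge.get('source', '').lower()
--         target = edge.get('target', '').lower()
--         if source in entity_set or target in entity_set:
--             relevant_edges.append(edge)
--
--     if not relevant_edges:
--         return ""
--
--     for edge in relevant_edges[:10]:  # Limit to 10 most relevant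
--         parts.append(f"- {edge.get('source', '?')} --[{edge.get('relation', '?')}]--> {edge.get('target', '?')}")
--
--     return "\n".join(parts) if len(parts) > 1 else ""
-- ===== SOURCE B (Python) =====
-- def _format_relationships(entities, edges):
--     """Format relevant relationships: index-driven while loop with a string
--     accumulator and a found counter; stops as soon as 10 relevant edges are
--     emitted, builds the result by direct concatenation (no lists, no join)."""
--     entity_set = {e.lower() for e in entities}
--     out = ""
--     found = 0
--     i = 0
--     while i < len(edges) and found < 10:
--         edge = edges[i]
--         if edge.get('source', '').lower() in entity_set or edge.get('target', '').lower() in entity_set: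
--             out += "\n- {} --[{}]--> {}".format(
--                 edge.get('source', '?'), edge.get('relation', '?'), edge.get('target', '?'))
--             found += 1
--         i += 1
--     return "## Relationships" + out if found else ""
-- ===== Notes on version B (the rewrite author's own statement) =====
-- stated objective: alternative
-- what changed: A stages the work: filter all edges into a relevant_edges list, slice the first 10, map them to formatted lines in a second loop, then join the line list; B is one index-driven while loop with a plain string accumulator and a found counter that concatenates each line directly and terminates the loop as soon as 10 relevant edges have been emitted, with no intermediate lists, slice or join.
import Mathlib
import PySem

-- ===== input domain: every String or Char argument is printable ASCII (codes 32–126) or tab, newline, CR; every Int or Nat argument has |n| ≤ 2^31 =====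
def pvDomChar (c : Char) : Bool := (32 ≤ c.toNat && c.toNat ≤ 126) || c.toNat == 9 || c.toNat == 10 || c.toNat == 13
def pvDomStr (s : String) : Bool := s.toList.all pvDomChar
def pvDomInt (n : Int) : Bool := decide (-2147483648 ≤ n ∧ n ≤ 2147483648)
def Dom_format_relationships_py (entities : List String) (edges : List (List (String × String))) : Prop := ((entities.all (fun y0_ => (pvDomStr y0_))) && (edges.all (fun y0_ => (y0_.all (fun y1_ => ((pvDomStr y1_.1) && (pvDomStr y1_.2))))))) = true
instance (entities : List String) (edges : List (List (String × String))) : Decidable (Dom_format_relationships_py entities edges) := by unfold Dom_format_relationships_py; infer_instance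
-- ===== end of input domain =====

-- B replaces A's staged filter / slice / format / join passes by one index-driven loop
-- with a string accumulator and a found counter that stops after 10 relevant edges; objective: alternative.

-- shared helpers: dict lookup with default and the relevance test (identical subexpressions in both Pythons)
def pvGetD (edge : List (String × String)) (k dflt : String) : String :=
  PySem.Dict.getD (PySem.Dict.mk edge) k dflt

def pvRel (es : PySem.Set String) (edge : List (String × String)) : Bool :=
  PySem.Set.contains es (PySem.Str.lower (pvGetD edge "source" "")) ||
  PySem.Set.contains es (PySem.Str.lower (pvGetD edge "target" ""))

-- ===== PORT A =====
-- A's f-string line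
def pvFmt (edge : List (String × String)) : String :=
  "- " ++ pvGetD edge "source" "?" ++ " --[" ++ pvGetD edge "relation" "?" ++ "]--> " ++ pvGetD edge "target" "?"

def format_relationships_py (entities : List String) (edges : List (List (String × String))) : String :=
  let entity_set : PySem.Set String := PySem.Set.ofList (entities.map PySem.Str.lower)
  let relevant_edges := edges.filter (fun e => pvRel entity_set e)
  if relevant_edges.isEmpty then ""
  else
    let parts := "## Relationships" :: (PySem.List.slice relevant_edges none (some 10)).map pvFmt
    if parts.length > 1 then PySem.Str.join "\n" parts else ""

-- ===== PORT B =====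
-- B's "\n- {} --[{}]--> {}".format(...) chunk
def pvLineB (edge : List (String × String)) : String :=
  "\n- " ++ pvGetD edge "source" "?" ++ " --[" ++ pvGetD edge "relation" "?" ++ "]--> " ++ pvGetD edge "target" "?"

-- B's while loop: 'while i < len(edges) and found < 10', accumulating (out, found);
-- advancing i over edges[i] is the structural recursion on the list
def pvLoopB (es : PySem.Set String) : List (List (String × String)) → String → Nat → String × Nat
  | [], out, found => (out, found)
  | e :: rest, out, found =>
    if found < 10 then
      if pvRel es e then pvLoopB es rest (out ++ pvLineB e) (found + 1)
      else pvLoopB es rest out found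
    else (out, found)

def format_relationships_py_alt (entities : List String) (edges : List (List (String × String))) : String :=
  let entity_set : PySem.Set String := PySem.Set.ofList (entities.map PySem.Str.lower)
  let r := pvLoopB entity_set edges "" 0
  if r.2 ≠ 0 then "## Relationships" ++ r.1 else ""

-- ===== PRECONDITION & SPEC =====
def Spec_format_relationships_py (entities : List String) (edges : List (List (String × String))) (out : String) : Prop := out = format_relationships_py_alt entities edges
instance (entities : List String) (edges : List (List (String × String))) (out : String) : Decidable (Spec_format_relationships_py entities edges out) := by unfold Spec_format_relationships_py; infer_instance

-- ===== CLAIM (what is proved, stated in full; the proofs are below) =====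
def Claim_equal_format_relationships_py : Prop := ∀ (entities : List String) (edges : List (List (String × String))), Dom_format_relationships_py entities edges → Spec_format_relationships_py entities edges (format_relationships_py entities edges)

-- ===== LEMMAS AND PROOFS =====

-- proof-only concatenation of a list of strings
def pvCat : List String → String
  | [] => ""
  | s :: t => s ++ pvCat t

theorem pvLineB_eq (e : List (String × String)) : pvLineB e = "\n" ++ pvFmt e := by
  apply String.toList_inj.mp
  simp [pvLineB, pvFmt]

-- the while loop computes: out ++ the concatenation of the lines of the first (10 - found)
-- relevant edges, and found + how many of them there are
theorem pvLoopB_eq (es : PySem.Set String) :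
    ∀ (l : List (List (String × String))) (out : String) (found : Nat),
      pvLoopB es l out found =
        (out ++ pvCat (((l.filter (fun e => pvRel es e)).take (10 - found)).map pvLineB),
         found + min (10 - found) (l.filter (fun e => pvRel es e)).length) := by
  intro l
  induction l with
  | nil => intro out found; simp [pvLoopB, pvCat]
  | cons e rest ih =>
    intro out found
    by_cases hf : found < 10
    · by_cases hr : pvRel es e
      · have h10 : 10 - found = (10 - (found + 1)) + 1 := by omega
        simp only [pvLoopB, if_pos hf, ih, List.filter_cons, hr, if_pos]
        rw [h10]
        simp only [List.take_succ_cons, List.map_cons, List.length_cons, pvCat,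
          Prod.mk.injEq, String.append_assoc]
        exact ⟨trivial, by omega⟩
      · simp only [pvLoopB, if_pos hf, hr, Bool.false_eq_true, if_false, ih, List.filter_cons]
    · have h0 : 10 - found = 0 := by omega
      simp [pvLoopB, if_neg hf, h0, pvCat]

theorem pvChars_join_cons (s : List Char) :
    ∀ (L : List (List Char)) (h : List Char),
      PySem.Chars.join s (h :: L) = h ++ (L.map (fun x => s ++ x)).flatten := by
  intro L
  induction L with
  | nil => intro h; simp [PySem.Chars.join_singleton]
  | cons b L ih =>
    intro h
    rw [PySem.Chars.join_cons_cons, ih b]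
    simp [List.append_assoc]

theorem pvCat_toList : ∀ (M : List String), (pvCat M).toList = (M.map String.toList).flatten := by
  intro M
  induction M with
  | nil => simp [pvCat]
  | cons s t ih => simp [pvCat, ih]

-- "\n".join("## Relationships" :: lines) = "## Relationships" ++ concat of the "\n"-prefixed lines
theorem join_eq_cat (L : List (List (String × String))) :
    PySem.Str.join "\n" ("## Relationships" :: L.map pvFmt) =
      "## Relationships" ++ pvCat (L.map pvLineB) := by
  apply String.toList_inj.mp
  simp only [PySem.Str.toList_join, List.map_cons]
  rw [pvChars_join_cons]
  simp only [String.toList_append, pvCat_toList, List.map_map]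
  congr 1
  congr 1
  exact List.map_congr_left (fun e _ => by simp [Function.comp, pvLineB_eq])

-- ===== VERDICT (by name: the statement is the Claim_ definition above) =====
theorem format_relationships_py_spec : Claim_equal_format_relationships_py := by
  intro entities edges _
  unfold Spec_format_relationships_py format_relationships_py format_relationships_py_alt
  simp only []
  set es := PySem.Set.ofList (entities.map PySem.Str.lower) with hes
  rw [pvLoopB_eq]
  cases hF : edges.filter (fun e => pvRel es e) with
  | nil => simp
  | cons a l =>
    have hsl : PySem.List.slice (a :: l) none (some 10) = (a :: l).take 10 := by
      rw [PySem.List.slice_to] <;> simp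
    simp only [hsl, List.isEmpty_cons, Bool.false_eq_true, if_false,
      Nat.sub_zero, Nat.zero_add, List.length_cons]
    rw [if_pos (by simp), if_pos (by simp : ¬ (min 10 (l.length + 1) = 0))]
    rw [join_eq_cat]
    apply String.toList_inj.mp
    simp
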